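-- pv_equiv track=rewrite | github.com/Nilsae/Leetcode | BackTracking/medium/codesignal_generate_combinations_from_a_list_of_words.py | solution
-- ===== SOURCE A (Python) =====
-- def solution(words):
--     results = []
--     for i in range(len(words)):
--         words[i] = list(words[i])
--     indices = [0 for j in range(len(words))]
--     new_word = []
--     def backtrack(new_word, word_num):
--         if word_num == len(words):
--             results.append(new_word)
--             return
--         new_word = new_word[:]
--         for c in words[word_num]:
--             backtrack(new_word + [c], word_num + 1)
--
--     backtrack([], 0)
--
--     answers_str = []
--     for a in results:
--         st = "".join(a)
--         answers_str.append(st)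
--
--     return sorted(answers_str)
-- ===== SOURCE B (Python) =====
-- def solution(words):
--     # Build the product back-to-front over suffixes, sorting each word's
--     # characters once; grouping equal characters keeps the output sorted,
--     # so no final sort of the whole product is needed.
--     suffixes = [""]
--     for w in reversed(words):
--         sw = sorted(w)
--         uniq = list(dict.fromkeys(sw))
--         suffixes = [c + s for c in uniq for s in suffixes for _ in range(sw.count(c))]
--     return suffixes
-- ===== Notes on version B (the rewrite author's own statement) =====
-- stated objective: faster
-- what changed: Replaces A's backtracking product plus a final sort of all N*...*N combination strings by an iterative right-to-left suffix product that sorts each word's characters once and groups equal characters, so the combinations are produced already in sorted order and the O(K log K) final sort disappears.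
import Mathlib
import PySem

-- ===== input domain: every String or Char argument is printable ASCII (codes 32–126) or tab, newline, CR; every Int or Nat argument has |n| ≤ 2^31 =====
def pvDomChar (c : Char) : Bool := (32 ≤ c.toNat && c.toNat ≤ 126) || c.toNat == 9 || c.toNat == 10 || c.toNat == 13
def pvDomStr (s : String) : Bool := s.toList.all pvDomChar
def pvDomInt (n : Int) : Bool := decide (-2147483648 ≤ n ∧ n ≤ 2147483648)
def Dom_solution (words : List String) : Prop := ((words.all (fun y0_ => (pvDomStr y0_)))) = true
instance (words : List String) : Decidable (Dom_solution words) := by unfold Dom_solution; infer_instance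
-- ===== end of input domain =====

-- B replaces A's backtracking + final sort by a right-to-left suffix product over
-- per-word sorted character groups, so the output comes out already sorted (no final sort).
-- A mutates its argument list in place (words[i] = list(words[i])); B does not — the
-- equivalence proved here is about the RETURN value only.

-- ===== PORT A =====
-- backtrack(new_word, word_num): recursion over the remaining words; the list of
-- results appended, in order.  (Python's 'new_word = new_word[:]' copy has no
-- effect on the value.)
def backtrackA : List (List Char) → List Char → List (List Char)
  | [], new_word => [new_word]
  | w :: rest, new_word => w.flatMap (fun c => backtrackA rest (new_word ++ [c]))

def solution (words : List String) : List String :=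
  -- for i in range(len(words)): words[i] = list(words[i])
  let ws := words.map (fun w => w.toList)
  let results := backtrackA ws []
  -- "".join(a) over a list of single characters: exactly String.ofList
  let answers_str := results.map (fun a => String.ofList a)
  PySem.List.sorted answers_str (fun s => s)

-- ===== PORT B =====
-- suffix strings are represented as their character lists; String.ofList is applied once at the end
def stepB (suffixes : List (List Char)) (w : List Char) : List (List Char) :=
  let sw := PySem.List.sorted w (fun c => c)
  let uniq := PySem.List.dedup sw          -- list(dict.fromkeys(sw))
  uniq.flatMap (fun c => suffixes.flatMap (fun s =>
    (PySem.List.pyRange 0 ((PySem.List.count sw c : Nat) : Int)).map (fun _ => c :: s)))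

def solution_alt (words : List String) : List String :=
  (((words.map (fun w => w.toList)).reverse.foldl stepB [[]]).map (fun s => String.ofList s))

-- ===== PRECONDITION & SPEC =====
def Spec_solution (words : List String) (out : List String) : Prop := out = solution_alt words
instance (words : List String) (out : List String) : Decidable (Spec_solution words out) := by unfold Spec_solution; infer_instance

-- ===== CLAIM (what is proved, stated in full; the proofs are below) =====
def Claim_equal_solution : Prop := ∀ (words : List String), Dom_solution words → Spec_solution words (solution words)

-- ===== LEMMAS AND PROOFS =====

-- the plain (unsorted) product of the words, in A's traversal order
def prodL : List (List Char) → List (List Char)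
  | [] => [[]]
  | w :: ws => w.flatMap (fun c => (prodL ws).map (fun t => c :: t))

theorem backtrackA_eq (ws : List (List Char)) : ∀ nw,
    backtrackA ws nw = (prodL ws).map (fun t => nw ++ t) := by
  induction ws with
  | nil => intro nw; simp [backtrackA, prodL]
  | cons w ws ih =>
      intro nw
      simp only [backtrackA, prodL, ih, List.map_flatMap, List.map_map]
      refine List.flatMap_congr ?_
      intro c _
      apply List.map_congr_left
      intro t _
      simp [Function.comp, List.append_assoc]

theorem pyRange_map_const {α : Type} (n : Nat) (x : α) :
    (PySem.List.pyRange 0 ((n : Nat) : Int)).map (fun _ => x) = List.replicate n x := by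
  rw [List.map_const']
  simp [PySem.List.length_pyRange_one]

theorem flatMap_cons_perm {α β : Type} (S : List α) (f : α → β) (g : α → List β) :
    (S.flatMap (fun s => f s :: g s)).Perm (S.map f ++ S.flatMap g) := by
  induction S with
  | nil => simp
  | cons s S ih =>
      simp only [List.flatMap_cons, List.map_cons, List.cons_append]
      refine List.Perm.cons _ ?_
      refine (ih.append_left (g s)).trans ?_
      rw [← List.append_assoc, ← List.append_assoc]
      exact List.perm_append_comm.append_right _

theorem rep_transpose {α β : Type} (m : Nat) (S : List α) (f : α → β) :
    (S.flatMap (fun s => List.replicate m (f s))).Perm ((List.replicate m (S.map f)).flatten) := by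
  induction m with
  | zero => simp
  | succ m ih =>
      simp only [List.replicate_succ, List.flatten_cons]
      exact (flatMap_cons_perm S f _).trans (ih.append_left (S.map f))

theorem rep_flatMap {α β : Type} (m : Nat) (c : α) (g : α → List β) :
    (List.replicate m c).flatMap g = (List.replicate m (g c)).flatten := by
  induction m with
  | zero => simp
  | succ m ih => simp [List.replicate_succ, ih]

theorem count_flatMap_rep (sw : List Char) : ∀ (d : List Char), d.Nodup → ∀ y,
    List.count y (d.flatMap (fun c => List.replicate (List.count c sw) c)) =
      if y ∈ d then List.count y sw else 0 := by
  intro d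
  induction d with
  | nil => simp
  | cons c d ih =>
      intro hnd y
      have hc : c ∉ d := (List.nodup_cons.mp hnd).1
      have hd : d.Nodup := (List.nodup_cons.mp hnd).2
      simp only [List.flatMap_cons, List.count_append, List.count_replicate, ih hd y]
      by_cases hyc : y = c
      · subst hyc
        simp [hc]
      · simp [hyc, Ne.symm hyc]

theorem count_decomp (sw : List Char) :
    sw.Perm ((PySem.List.dedup sw).flatMap (fun c => List.replicate (List.count c sw) c)) := by
  rw [List.perm_iff_count]
  intro y
  rw [count_flatMap_rep sw (PySem.List.dedup sw) (PySem.List.nodup_dedup sw) y]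
  by_cases hy : y ∈ sw
  · rw [if_pos ((PySem.List.mem_dedup sw y).mpr hy)]
  · rw [if_neg (fun h => hy ((PySem.List.mem_dedup sw y).mp h)), List.count_eq_zero.mpr hy]

theorem stepB_perm (S : List (List Char)) (w : List Char) :
    (stepB S w).Perm (w.flatMap (fun c => S.map (fun t => c :: t))) := by
  have h1 : stepB S w =
      (PySem.List.dedup (PySem.List.sorted w (fun c => c))).flatMap
        (fun c => S.flatMap (fun s =>
          List.replicate (List.count c (PySem.List.sorted w (fun c => c))) (c :: s))) := by
    simp only [stepB, PySem.List.count_eq, pyRange_map_const]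
  rw [h1]
  set sw := PySem.List.sorted w (fun c => c) with hsw
  have hwsw : w.Perm sw := (PySem.List.sorted_perm w (fun c => c) false).symm
  have h2 : (w.flatMap (fun c => S.map (fun t => c :: t))).Perm
      (sw.flatMap (fun c => S.map (fun t => c :: t))) :=
    hwsw.flatMap (fun _ _ => List.Perm.refl _)
  have h3 : (sw.flatMap (fun c => S.map (fun t => c :: t))).Perm
      (((PySem.List.dedup sw).flatMap (fun c => List.replicate (List.count c sw) c)).flatMap
        (fun c => S.map (fun t => c :: t))) :=
    (count_decomp sw).flatMap (fun _ _ => List.Perm.refl _)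
  have h4 : (((PySem.List.dedup sw).flatMap (fun c => List.replicate (List.count c sw) c)).flatMap
        (fun c => S.map (fun t => c :: t))) =
      (PySem.List.dedup sw).flatMap
        (fun c => (List.replicate (List.count c sw) (S.map (fun t => c :: t))).flatten) := by
    rw [List.flatMap_assoc]
    simp only [rep_flatMap]
  refine List.Perm.symm (h2.trans (h3.trans ?_))
  rw [h4]
  exact (List.Perm.refl _).flatMap
    (fun c _ => ((rep_transpose (List.count c sw) S (fun t => c :: t))).symm)

theorem main_perm : ∀ ws : List (List Char),
    (ws.foldr (fun w S => stepB S w) [[]]).Perm (prodL ws) := by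
  intro ws
  induction ws with
  | nil => simp [prodL]
  | cons w ws ih =>
      simp only [List.foldr_cons, prodL]
      exact (stepB_perm _ w).trans
        ((List.Perm.refl w).flatMap (fun c _ => ih.map _))

-- order lemmas on lexicographic List Char
theorem cons_le_of_lt {c d : Char} (h : c < d) (s t : List Char) : (c :: s) ≤ (d :: t) :=
  le_of_lt (List.cons_lt_cons_iff.mpr (Or.inl h))

theorem dedup_sublist {α : Type} [BEq α] [LawfulBEq α] (xs : List α) :
    (PySem.List.dedup xs).Sublist xs := by
  have key : ∀ (l acc : List α), ∃ t, List.foldl PySem.Set.add acc l = acc ++ t ∧ t.Sublist l := by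
    intro l
    induction l with
    | nil => intro acc; exact ⟨[], by simp⟩
    | cons x l ih =>
        intro acc
        by_cases hx : x ∈ acc
        · obtain ⟨t, ht, hs⟩ := ih acc
          refine ⟨t, ?_, hs.cons x⟩
          simpa [PySem.Set.add, hx] using ht
        · obtain ⟨t, ht, hs⟩ := ih (acc ++ [x])
          refine ⟨x :: t, ?_, hs.cons₂ x⟩
          rw [List.foldl_cons]
          simp only [PySem.Set.add]
          rw [if_neg (by simpa using hx)]
          simpa [List.append_assoc] using ht
  obtain ⟨t, ht, hs⟩ := key xs []
  have : PySem.List.dedup xs = t := by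
    simpa [PySem.List.dedup, PySem.Set.ofList, PySem.Set.empty] using ht
  rw [this]; exact hs

theorem uniq_pairwise (w : List Char) :
    (PySem.List.dedup (PySem.List.sorted w (fun c => c))).Pairwise (· < ·) := by
  have h1 : (PySem.List.sorted w (fun c => c)).Pairwise (fun a b => a ≤ b) :=
    PySem.List.sorted_pairwise w (fun c => c)
  have h2 : (PySem.List.dedup (PySem.List.sorted w (fun c => c))).Pairwise (fun a b => a ≤ b) :=
    List.Pairwise.sublist (dedup_sublist _) h1
  have h3 : (PySem.List.dedup (PySem.List.sorted w (fun c => c))).Pairwise (fun a b => a ≠ b) :=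
    PySem.List.nodup_dedup _
  exact (h2.and h3).imp (fun h => lt_of_le_of_ne h.1 h.2)

theorem step_pairwise (S : List (List Char)) (w : List Char)
    (hS : S.Pairwise (· ≤ ·)) : (stepB S w).Pairwise (· ≤ ·) := by
  have h1 : stepB S w =
      (PySem.List.dedup (PySem.List.sorted w (fun c => c))).flatMap
        (fun c => S.flatMap (fun s =>
          List.replicate (List.count c (PySem.List.sorted w (fun c => c))) (c :: s))) := by
    simp only [stepB, PySem.List.count_eq, pyRange_map_const]
  rw [h1]
  set sw := PySem.List.sorted w (fun c => c) with hsw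
  rw [List.flatMap_def, List.pairwise_flatten]
  constructor
  · intro l hl
    obtain ⟨c, _, rfl⟩ := List.mem_map.mp hl
    rw [List.flatMap_def, List.pairwise_flatten]
    constructor
    · intro l' hl'
      obtain ⟨s, _, rfl⟩ := List.mem_map.mp hl'
      exact List.pairwise_replicate.mpr (Or.inr le_rfl)
    · rw [List.pairwise_map]
      refine hS.imp ?_
      intro s1 s2 h12 x hx y hy
      rw [List.eq_of_mem_replicate hx, List.eq_of_mem_replicate hy]
      exact List.cons_le_cons c h12
  · rw [List.pairwise_map]
    refine (uniq_pairwise w).imp ?_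
    intro c1 c2 h12 x hx y hy
    obtain ⟨s1, _, hx'⟩ := List.mem_flatMap.mp hx
    obtain ⟨s2, _, hy'⟩ := List.mem_flatMap.mp hy
    rw [List.eq_of_mem_replicate hx', List.eq_of_mem_replicate hy']
    exact cons_le_of_lt h12 s1 s2

theorem main_pairwise : ∀ ws : List (List Char),
    (ws.foldr (fun w S => stepB S w) [[]]).Pairwise (· ≤ ·) := by
  intro ws
  induction ws with
  | nil => simp
  | cons w ws ih => exact step_pairwise _ w ih

-- ===== VERDICT (by name: the statement is the Claim_ definition above) =====
theorem solution_spec : Claim_equal_solution := by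
  intro words _
  unfold Spec_solution
  have hA : solution words =
      PySem.List.sorted ((prodL (words.map (fun w => w.toList))).map (fun a => String.ofList a))
        (fun s => s) := by
    simp only [solution, backtrackA_eq, List.nil_append]
    simp
  have hB : solution_alt words =
      (((words.map (fun w => w.toList)).foldr (fun w S => stepB S w) [[]]).map
        (fun s => String.ofList s)) := by
    simp only [solution_alt, List.foldl_reverse]
  set ws := words.map (fun w => w.toList) with hws
  set M := ws.foldr (fun w S => stepB S w) [[]] with hM
  rw [hA, hB]
  refine PySem.List.eq_of_perm_of_pairwise_le_of_injective (fun s : String => s)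
    (fun a b h => h) ?_ ?_ ?_
  · exact (PySem.List.sorted_perm _ _ false).trans (((main_perm ws).map _).symm)
  · exact PySem.List.sorted_pairwise _ _
  · rw [List.pairwise_map]
    refine (main_pairwise ws).imp ?_
    intro a b hab
    rw [String.le_iff_toList_le, String.toList_ofList, String.toList_ofList]
    exact hab
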